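-- pv_equiv track=rewrite | github.com/NinaTea/consultas | practica6.py | peso_pino
-- ===== SOURCE A (Python) =====
-- def peso_pino (altura_metros:int) -> int:
--     i:int = altura_metros
--     peso_kg: int = 0
--     while i > 3:
--         i -= 1
--         peso_kg += 200
--     for i in range (3, 0, -1):
--         peso_kg += 300
--     return peso_kg
-- ===== SOURCE B (Python) =====
-- def peso_pino(altura_metros: int) -> int:
--     return 900 + 200 * max(altura_metros - 3, 0)
-- ===== Notes on version B (the rewrite author's own statement) =====
-- stated objective: faster
-- what changed: Replaced the counting while-loop and the fixed for-loop with a closed-form arithmetic expression in the height.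
import Mathlib
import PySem

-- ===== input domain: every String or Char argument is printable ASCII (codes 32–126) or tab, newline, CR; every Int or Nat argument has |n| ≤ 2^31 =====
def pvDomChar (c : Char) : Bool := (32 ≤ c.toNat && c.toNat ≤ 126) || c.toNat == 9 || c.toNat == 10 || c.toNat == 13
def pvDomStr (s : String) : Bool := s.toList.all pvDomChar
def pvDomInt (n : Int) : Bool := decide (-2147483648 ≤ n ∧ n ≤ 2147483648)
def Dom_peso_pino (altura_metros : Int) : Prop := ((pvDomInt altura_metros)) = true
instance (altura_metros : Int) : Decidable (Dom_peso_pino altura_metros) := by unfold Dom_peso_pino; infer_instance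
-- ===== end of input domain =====

-- B replaces A's two loops with a closed-form arithmetic expression: O(1) instead of O(n) in the height.

-- ===== PORT A =====
-- the while-loop: state (i, peso_kg); runs while i > 3
def pesoPinoWhile (i : Int) (peso_kg : Int) : Int :=
  if h : i > 3 then pesoPinoWhile (i - 1) (peso_kg + 200) else peso_kg
termination_by (i - 3).toNat
decreasing_by omega

def peso_pino (altura_metros : Int) : Int :=
  let i : Int := altura_metros
  let peso_kg : Int := 0
  let peso_kg := pesoPinoWhile i peso_kg
  -- for i in range(3, 0, -1): peso_kg += 300
  let peso_kg := (PySem.List.pyRange 3 0 (-1)).foldl (fun acc _ => acc + 300) peso_kg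
  peso_kg

-- ===== PORT B =====
def peso_pino_alt (altura_metros : Int) : Int :=
  900 + 200 * max (altura_metros - 3) 0

-- ===== PRECONDITION & SPEC =====
def Spec_peso_pino (altura_metros : Int) (out : Int) : Prop := out = peso_pino_alt altura_metros
instance (altura_metros : Int) (out : Int) : Decidable (Spec_peso_pino altura_metros out) := by unfold Spec_peso_pino; infer_instance

-- ===== CLAIM (what is proved, stated in full; the proofs are below) =====
def Claim_equal_peso_pino : Prop := ∀ (altura_metros : Int), Dom_peso_pino altura_metros → Spec_peso_pino altura_metros (peso_pino altura_metros)

-- ===== LEMMAS AND PROOFS =====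
theorem pesoPinoWhile_eq (i peso_kg : Int) :
    pesoPinoWhile i peso_kg = peso_kg + 200 * max (i - 3) 0 := by
  induction i, peso_kg using pesoPinoWhile.induct with
  | case1 i p h ih =>
    rw [pesoPinoWhile, dif_pos h, ih]
    omega
  | case2 i p h =>
    rw [pesoPinoWhile, dif_neg h]
    omega

-- ===== VERDICT (by name: the statement is the Claim_ definition above) =====
theorem peso_pino_spec : Claim_equal_peso_pino := by
  intro a _
  show peso_pino a = peso_pino_alt a
  simp only [peso_pino, peso_pino_alt, pesoPinoWhile_eq]
  have h3 : PySem.List.pyRange 3 0 (-1) = [3, 2, 1] := by decide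
  rw [h3]
  simp [List.foldl]
  omega
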